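-- pv_equiv track=rewrite | github.com/Mihyar-30614/Genetic-Programming-Benchmarking-Deep-Memory-Tasks | DEAP/Copy Task/runner.py | generate_action
-- ===== SOURCE A (Python) =====
-- def generate_action(data_array, num_tests, type):
--     retval = []
--     delim = -1 if type == 'mod' else 0
--
--     for i in range(num_tests):
--         data, action, write = data_array[i], [], False
--         length = len(data)
--
--         # 0 = PUSH, 1 = POP HEAD, 2 = NOTHING, 3 = POP TAIL
--         for x in range(length):
--             if data[x][0] == 1 and data[x][1] == delim:
--                 write = True
--                 action.append(2)
--             elif data[x][0] == delim and data[x][1] == 1: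
--                 write = False
--                 action.append(2)
--             else:
--                 action.append(0) if write == True else action.append(1)
--         retval.append(action)
--     return retval
-- ===== SOURCE B (Python) =====
-- from itertools import accumulate
--
-- def generate_action(data_array, num_tests, type):
--     delim = -1 if type == 'mod' else 0
--     result = []
--     for data in data_array[:max(num_tests, 0)]:
--         # pass 1: mark each element (+1 = write-on marker, -1 = write-off marker, 0 = plain)
--         marks = [1 if (p[0] == 1 and p[1] == delim) else
--                  (-1 if (p[0] == delim and p[1] == 1) else 0)
--                  for p in data]
--         # pass 2: write-state in effect BEFORE each element (shifted running state)
--         pre = list(accumulate(marks, lambda w, m: m or w, initial=0))[:-1]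
--         result.append([2 if m else (0 if w == 1 else 1)
--                        for m, w in zip(marks, pre)])
--     return result
-- ===== Notes on version B (the rewrite author's own statement) =====
-- stated objective: alternative
-- what changed: Replaces A's single stateful loop (write flag mutated while classifying) by a three-pass pipeline per test: a marks pass labelling each pair +1/-1/0, an itertools.accumulate pass producing the shifted write-state in effect before each element, and a zip comprehension mapping (mark, state) to the action code.
import Mathlib
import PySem

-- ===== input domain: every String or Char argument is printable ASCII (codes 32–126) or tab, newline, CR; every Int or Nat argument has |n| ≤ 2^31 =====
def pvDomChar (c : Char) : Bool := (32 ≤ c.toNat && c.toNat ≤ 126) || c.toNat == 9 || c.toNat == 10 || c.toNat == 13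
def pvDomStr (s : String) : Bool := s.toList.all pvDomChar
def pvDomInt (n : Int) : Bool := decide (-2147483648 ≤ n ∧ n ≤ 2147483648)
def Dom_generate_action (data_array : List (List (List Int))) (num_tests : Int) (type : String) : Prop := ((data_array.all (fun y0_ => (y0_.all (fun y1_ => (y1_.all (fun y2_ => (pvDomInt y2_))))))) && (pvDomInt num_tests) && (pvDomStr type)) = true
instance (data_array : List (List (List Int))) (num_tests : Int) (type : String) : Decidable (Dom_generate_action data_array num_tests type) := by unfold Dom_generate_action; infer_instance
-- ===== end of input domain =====

-- B separates state-accumulation from classification (marks pass, shifted running-state pass,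
-- classification pass) instead of A's single stateful loop; objective: alternative decomposition.

-- ===== PORT A =====
def generate_action (data_array : List (List (List Int))) (num_tests : Int) (type : String) : List (List Int) :=
  let delim : Int := if type = "mod" then -1 else 0
  ((PySem.List.pyRange 0 num_tests 1).foldl (fun retval i =>
    let data := PySem.List.pyGetD data_array i []
    let res := (PySem.List.pyRange 0 (data.length : Int) 1).foldl
      (fun (st : List Int × Bool) x =>
        let p := PySem.List.pyGetD data x []
        if PySem.List.pyGetD p 0 0 = 1 ∧ PySem.List.pyGetD p 1 0 = delim then (st.1 ++ [2], true)
        else if PySem.List.pyGetD p 0 0 = delim ∧ PySem.List.pyGetD p 1 0 = 1 then (st.1 ++ [2], false)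
        else (st.1 ++ [if st.2 = true then 0 else 1], st.2))
      ([], false)
    retval ++ [res.1]) [])

-- ===== PORT B =====
-- marks pass: +1 = write-on marker, -1 = write-off marker, 0 = plain element
def markOf (delim : Int) (p : List Int) : Int :=
  if PySem.List.pyGetD p 0 0 = 1 ∧ PySem.List.pyGetD p 1 0 = delim then 1
  else if PySem.List.pyGetD p 0 0 = delim ∧ PySem.List.pyGetD p 1 0 = 1 then -1 else 0

def generate_action_alt (data_array : List (List (List Int))) (num_tests : Int) (type : String) : List (List Int) :=
  let delim : Int := if type = "mod" then -1 else 0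
  (data_array.take (max num_tests 0).toNat).map (fun data =>
    let marks := data.map (markOf delim)
    -- itertools.accumulate(marks, m or w, initial=0), last state dropped = state BEFORE each element
    let pre := (List.scanl (fun w m => if m = 0 then w else m) 0 marks).dropLast
    (marks.zip pre).map (fun mw => if mw.1 = 0 then (if mw.2 = 1 then 0 else 1) else 2))

-- ===== PRECONDITION & SPEC =====
-- Pre_ excludes exactly the inputs where Python A raises: num_tests beyond len(data_array)
-- (IndexError on data_array[i]), and — within the first num_tests tests — an empty pair
-- (IndexError on data[x][0]) or a pair whose head is 1 or delim but has no second element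
-- (IndexError on data[x][1]; short-circuit evaluation reaches index 1 only in that case).
def Pre_generate_action (data_array : List (List (List Int))) (num_tests : Int) (type : String) : Prop :=
  num_tests ≤ (data_array.length : Int) ∧
  ∀ data ∈ data_array.take num_tests.toNat, ∀ p ∈ data,
    p ≠ [] ∧ ((p.getD 0 0 = 1 ∨ p.getD 0 0 = (if type = "mod" then -1 else 0)) → 2 ≤ p.length)
instance (data_array : List (List (List Int))) (num_tests : Int) (type : String) : Decidable (Pre_generate_action data_array num_tests type) := by unfold Pre_generate_action; infer_instance

def pvWitness_generate_action : List (List (List Int)) × Int × String :=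
  ([[[1, 0], [5, 3], [0, 1], [7, 2]]], 1, "copy")

def Spec_generate_action (data_array : List (List (List Int))) (num_tests : Int) (type : String) (out : List (List Int)) : Prop := out = generate_action_alt data_array num_tests type
instance (data_array : List (List (List Int))) (num_tests : Int) (type : String) (out : List (List Int)) : Decidable (Spec_generate_action data_array num_tests type out) := by unfold Spec_generate_action; infer_instance

-- ===== CLAIM (what is proved, stated in full; the proofs are below) =====
def Claim_equal_generate_action : Prop := ∀ (data_array : List (List (List Int))) (num_tests : Int) (type : String), Dom_generate_action data_array num_tests type → Pre_generate_action data_array num_tests type → Spec_generate_action data_array num_tests type (generate_action data_array num_tests type)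

-- ===== LEMMAS AND PROOFS =====

-- A's inner loop body
def bodyA (delim : Int) (st : List Int × Bool) (p : List Int) : List Int × Bool :=
  if PySem.List.pyGetD p 0 0 = 1 ∧ PySem.List.pyGetD p 1 0 = delim then (st.1 ++ [2], true)
  else if PySem.List.pyGetD p 0 0 = delim ∧ PySem.List.pyGetD p 1 0 = 1 then (st.1 ++ [2], false)
  else (st.1 ++ [if st.2 = true then 0 else 1], st.2)

-- reference per-test result: write flag threaded structurally
def specAct (delim : Int) : Bool → List (List Int) → List Int
  | _, [] => []
  | w, p :: rest =>
    if PySem.List.pyGetD p 0 0 = 1 ∧ PySem.List.pyGetD p 1 0 = delim then 2 :: specAct delim true rest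
    else if PySem.List.pyGetD p 0 0 = delim ∧ PySem.List.pyGetD p 1 0 = 1 then 2 :: specAct delim false rest
    else (if w then 0 else 1) :: specAct delim w rest

theorem foldA_eq_specAct (delim : Int) (data : List (List Int)) :
    ∀ (acc : List Int) (w : Bool),
      (data.foldl (bodyA delim) (acc, w)).1 = acc ++ specAct delim w data := by
  induction data with
  | nil => intro acc w; simp [specAct]
  | cons p rest ih =>
    intro acc w
    rw [List.foldl_cons]
    by_cases h1 : PySem.List.pyGetD p 0 0 = 1 ∧ PySem.List.pyGetD p 1 0 = delim
    · have hb : bodyA delim (acc, w) p = (acc ++ [2], true) := by rw [bodyA, if_pos h1]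
      rw [hb, ih]; simp only [specAct]; rw [if_pos h1]; simp
    · by_cases h2 : PySem.List.pyGetD p 0 0 = delim ∧ PySem.List.pyGetD p 1 0 = 1
      · have hb : bodyA delim (acc, w) p = (acc ++ [2], false) := by
          rw [bodyA, if_neg h1, if_pos h2]
        rw [hb, ih]; simp only [specAct]; rw [if_neg h1, if_pos h2]; simp
      · have hb : bodyA delim (acc, w) p = (acc ++ [if w = true then 0 else 1], w) := by
          rw [bodyA, if_neg h1, if_neg h2]
        rw [hb, ih]; simp only [specAct]; rw [if_neg h1, if_neg h2]
        cases w <;> simp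

-- B's per-test three-pass computation also computes specAct
theorem bpass_eq_specAct (delim : Int) (data : List (List Int)) :
    ∀ (w0 : Int) (w : Bool), (w0 = 1 ↔ w = true) →
      ((data.map (markOf delim)).zip
        ((List.scanl (fun w m => if m = 0 then w else m) w0 (data.map (markOf delim))).dropLast)).map
        (fun mw => if mw.1 = 0 then (if mw.2 = 1 then 0 else 1) else 2)
      = specAct delim w data := by
  induction data with
  | nil => intro w0 w _; simp [specAct]
  | cons p rest ih =>
    intro w0 w hw
    have hne : List.scanl (fun w m => if m = 0 then w else m)
        ((fun w m => if m = 0 then w else m) w0 (markOf delim p)) (rest.map (markOf delim)) ≠ [] :=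
      List.scanl_ne_nil
    rw [List.map_cons, List.scanl_cons, List.dropLast_cons_of_ne_nil hne, List.zip_cons_cons,
        List.map_cons]
    by_cases h1 : PySem.List.pyGetD p 0 0 = 1 ∧ PySem.List.pyGetD p 1 0 = delim
    · have hm : markOf delim p = 1 := by rw [markOf, if_pos h1]
      simp only [hm]
      norm_num
      rw [ih 1 true (by simp)]
      simp only [specAct]; rw [if_pos h1]
    · by_cases h2 : PySem.List.pyGetD p 0 0 = delim ∧ PySem.List.pyGetD p 1 0 = 1
      · have hm : markOf delim p = -1 := by rw [markOf, if_neg h1, if_pos h2]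
        simp only [hm]
        norm_num
        rw [ih (-1) false (by simp)]
        simp only [specAct]; rw [if_neg h1, if_pos h2]
      · have hm : markOf delim p = 0 := by rw [markOf, if_neg h1, if_neg h2]
        simp only [hm]
        norm_num
        rw [ih w0 w hw]
        simp only [specAct]; rw [if_neg h1, if_neg h2]
        cases w <;> simp_all

-- A's inner range-indexed fold, as transliterated, computes specAct with initial write = False
theorem innerA_eq (delim : Int) (data : List (List Int)) :
    ((PySem.List.pyRange 0 ((data.length : Int)) 1).foldl
      (fun (st : List Int × Bool) x => bodyA delim st (PySem.List.pyGetD data x ([] : List Int)))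
      (([], false) : List Int × Bool)).1 = specAct delim false data := by
  have h := PySem.List.foldl_pyRange_pyGetD' (a := 0) (xs := data) (f := bodyA delim)
    (d := ([] : List Int)) (init := (([], false) : List Int × Bool)) (le_refl 0)
  simp only [Int.toNat_zero, List.drop_zero] at h
  rw [h, foldA_eq_specAct]
  simp

theorem max_toNat (n : Int) : (max n 0).toNat = n.toNat := by omega

-- ===== VERDICT (by name: the statement is the Claim_ definition above) =====
theorem generate_action_spec : Claim_equal_generate_action := by
  intro data_array num_tests type _hdom hpre
  unfold Spec_generate_action generate_action generate_action_alt
  obtain ⟨hlen, -⟩ := hpre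
  set delim : Int := if type = "mod" then -1 else 0 with hd
  simp only [max_toNat]
  set T := data_array.take num_tests.toNat with hT
  by_cases hn : 0 ≤ num_tests
  · have hTlen : T.length = num_tests.toNat := by
      simp only [hT, List.length_take]; omega
    have hcast : num_tests = (T.length : Int) := by rw [hTlen]; omega
    have hcongr :
        (PySem.List.pyRange 0 num_tests 1).foldl (fun retval i =>
          retval ++ [((PySem.List.pyRange 0 (((PySem.List.pyGetD data_array i ([] : List (List Int))).length : Int)) 1).foldl
            (fun (st : List Int × Bool) x => bodyA delim st (PySem.List.pyGetD (PySem.List.pyGetD data_array i ([] : List (List Int))) x ([] : List Int)))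
            (([], false) : List Int × Bool)).1]) []
        = (PySem.List.pyRange 0 num_tests 1).foldl (fun retval i =>
          retval ++ [((PySem.List.pyRange 0 (((PySem.List.pyGetD T i ([] : List (List Int))).length : Int)) 1).foldl
            (fun (st : List Int × Bool) x => bodyA delim st (PySem.List.pyGetD (PySem.List.pyGetD T i ([] : List (List Int))) x ([] : List Int)))
            (([], false) : List Int × Bool)).1]) [] := by
      apply PySem.List.foldl_congr_mem
      intro acc i hi
      have hib := (PySem.List.mem_pyRange_one).1 hi
      have h0 : (0 : Int) ≤ i := by omega
      have hilt : i < (data_array.length : Int) := by omega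
      have hiT : i < (T.length : Int) := by rw [hTlen]; omega
      obtain ⟨n, rfl⟩ := Int.eq_ofNat_of_zero_le h0
      have hn1 : n < data_array.length := by exact_mod_cast hilt
      have hn2 : n < T.length := by exact_mod_cast hiT
      rw [PySem.List.pyGetD_natCast, PySem.List.pyGetD_natCast,
          List.getD_eq_getElem _ _ hn1, List.getD_eq_getElem _ _ hn2]
      have : T[n] = data_array[n] := by
        simp only [hT, List.getElem_take]
      rw [this]
    have final :
        (PySem.List.pyRange 0 num_tests 1).foldl (fun retval i =>
          retval ++ [((PySem.List.pyRange 0 (((PySem.List.pyGetD data_array i ([] : List (List Int))).length : Int)) 1).foldl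
            (fun (st : List Int × Bool) x => bodyA delim st (PySem.List.pyGetD (PySem.List.pyGetD data_array i ([] : List (List Int))) x ([] : List Int)))
            (([], false) : List Int × Bool)).1]) []
        = T.map (fun data =>
            ((data.map (markOf delim)).zip
              ((List.scanl (fun w m => if m = 0 then w else m) 0 (data.map (markOf delim))).dropLast)).map
              (fun mw => if mw.1 = 0 then (if mw.2 = 1 then 0 else 1) else 2)) := by
      rw [hcongr]
      have hout := PySem.List.foldl_pyRange_pyGetD' (a := 0) (xs := T)
        (f := fun (retval : List (List Int)) (data : List (List Int)) =>
          retval ++ [((PySem.List.pyRange 0 ((data.length : Int)) 1).foldl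
            (fun (st : List Int × Bool) x => bodyA delim st (PySem.List.pyGetD data x ([] : List Int)))
            (([], false) : List Int × Bool)).1])
        (d := ([] : List (List Int))) (init := ([] : List (List Int))) (le_refl 0)
      simp only [Int.toNat_zero, List.drop_zero] at hout
      rw [hcast, hout, PySem.List.foldl_append_singleton_eq_map]
      apply List.map_congr_left
      intro data _
      rw [innerA_eq, bpass_eq_specAct delim data 0 false (by simp)]
    exact final
  · have hneg : PySem.List.pyRange 0 num_tests 1 = [] := by
      simp [PySem.List.pyRange]; omega
    have : num_tests.toNat = 0 := by omega
    simp [hneg, hT, this]
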